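-- pv_equiv track=rewrite | github.com/TommyDevG/ExerciceProgrammationCogiceo | main.py | calculate_generated_space
-- ===== SOURCE A (Python) =====
-- def calculate_generated_space(mask_find):
--
--     generated_space_dictionary = {
--         'l': 26,
--         'u': 26,
--         'd': 10,
--         'h': 16,
--         'H': 16,
--         's': 33,
--         'a': 95,
--         'b': 255
--     }
--
--     # Je multiplie chaque taille des espaces générés afin de trouver la taille d'un masque
--     mask_generate_space = 1
--     for letter in mask_find:
--         for letter_for_mask in generated_space_dictionary:
--             if letter == letter_for_mask:
--                 mask_generate_space *= generated_space_dictionary[letter_for_mask]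
--
--     return mask_generate_space
-- ===== SOURCE B (Python) =====
-- def calculate_generated_space(mask_find):
--
--     generated_space_dictionary = {
--         'l': 26,
--         'u': 26,
--         'd': 10,
--         'h': 16,
--         'H': 16,
--         's': 33,
--         'a': 95,
--         'b': 255
--     }
--
--     # Two staged passes instead of a nested scan: first build a frequency
--     # table of the mask characters, then multiply each charset size raised
--     # to its letter's count over the 8 fixed entries.
--     counts = {}
--     for ch in mask_find:
--         counts[ch] = counts.get(ch, 0) + 1
--
--     space = 1
--     for letter, size in generated_space_dictionary.items():
--         space *= size ** counts.get(letter, 0)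
--     return space
-- ===== Notes on version B (the rewrite author's own statement) =====
-- stated objective: faster
-- what changed: B replaces A's nested per-character scan of the dictionary with two staged passes: it first builds a frequency table of the mask characters, then multiplies size ** count once per charset entry, so big-int multiplications drop from one per mask character to at most 8.
import Mathlib
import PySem

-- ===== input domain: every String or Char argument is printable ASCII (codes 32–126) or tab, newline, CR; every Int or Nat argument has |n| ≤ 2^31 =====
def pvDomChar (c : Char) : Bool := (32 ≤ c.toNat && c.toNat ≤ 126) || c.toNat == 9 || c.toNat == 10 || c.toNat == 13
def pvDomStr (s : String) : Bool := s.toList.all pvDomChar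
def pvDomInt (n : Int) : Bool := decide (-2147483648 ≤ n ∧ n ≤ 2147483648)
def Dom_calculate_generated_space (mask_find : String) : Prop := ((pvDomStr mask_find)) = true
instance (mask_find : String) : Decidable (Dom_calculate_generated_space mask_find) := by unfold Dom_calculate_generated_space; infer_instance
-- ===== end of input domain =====

-- B replaces A's nested per-character dictionary scan with two staged passes:
-- build a frequency table of the mask characters, then multiply size ^ count
-- over the 8 fixed charset entries (objective: fewer big-int multiplies).


-- ===== PORT A =====
-- the literal 8-entry dict, as an association list in insertion order (keys distinct)
def pvGenTable : List (Char × Int) :=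
  [('l', 26), ('u', 26), ('d', 10), ('h', 16), ('H', 16), ('s', 33), ('a', 95), ('b', 255)]

-- A: for each mask character, scan the dict keys; on a key match multiply by
-- the looked-up value (keys are distinct, so d[letter_for_mask] is the pair's value).
def calculate_generated_space (mask_find : String) : Int :=
  mask_find.toList.foldl
    (fun mask_generate_space letter =>
      pvGenTable.foldl
        (fun acc kv => if letter = kv.1 then acc * kv.2 else acc)
        mask_generate_space)
    1

-- ===== PORT B =====
-- B, stage 1: counts[ch] = counts.get(ch, 0) + 1 over the mask characters.
def pvCounts (mask_find : String) : PySem.Dict Char Int :=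
  mask_find.toList.foldl (fun d ch => d.insert ch (d.getD ch 0 + 1)) PySem.Dict.empty

-- B, stage 2: space *= size ** counts.get(letter, 0) over the 8 entries.
def calculate_generated_space_alt (mask_find : String) : Int :=
  pvGenTable.foldl
    (fun space kv => space * kv.2 ^ ((pvCounts mask_find).getD kv.1 0).toNat)
    1

-- ===== PRECONDITION & SPEC =====
def Spec_calculate_generated_space (mask_find : String) (out : Int) : Prop := out = calculate_generated_space_alt mask_find
instance (mask_find : String) (out : Int) : Decidable (Spec_calculate_generated_space mask_find out) := by unfold Spec_calculate_generated_space; infer_instance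

-- ===== CLAIM (what is proved, stated in full; the proofs are below) =====
def Claim_equal_calculate_generated_space : Prop := ∀ (mask_find : String), Dom_calculate_generated_space mask_find → Spec_calculate_generated_space mask_find (calculate_generated_space mask_find)

-- ===== LEMMAS AND PROOFS =====

-- the factor A multiplies in for one mask character
def pvFactor (c : Char) : Int :=
  pvGenTable.foldl (fun acc kv => if c = kv.1 then acc * kv.2 else acc) 1

-- a multiply-accumulate fold is the product of the mapped list
theorem pvFoldl_mul {α : Type} (h : α → Int) (t : List α) (a : Int) :
    t.foldl (fun s x => s * h x) a = a * (t.map h).prod := by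
  induction t generalizing a with
  | nil => simp
  | cons x xs ih => rw [List.foldl_cons, ih, List.map_cons, List.prod_cons]; ring

-- A's inner scan, in product form (over ANY table)
theorem pvInner_eq (t : List (Char × Int)) (acc : Int) (c : Char) :
    t.foldl (fun a kv => if c = kv.1 then a * kv.2 else a) acc
      = acc * (t.map (fun kv => if c = kv.1 then kv.2 else 1)).prod := by
  induction t generalizing acc with
  | nil => simp
  | cons kv ts ih =>
    rw [List.foldl_cons, ih, List.map_cons, List.prod_cons]
    split_ifs <;> ring

theorem pvFactor_eq (c : Char) :
    pvFactor c = (pvGenTable.map (fun kv => if c = kv.1 then kv.2 else 1)).prod := by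
  rw [pvFactor, pvInner_eq, one_mul]

-- A's outer loop is the product of the per-character factors
theorem pvA_eq (l : List Char) (a : Int) :
    l.foldl
      (fun mask_generate_space letter =>
        pvGenTable.foldl (fun acc kv => if letter = kv.1 then acc * kv.2 else acc)
          mask_generate_space) a
      = a * (l.map pvFactor).prod := by
  induction l generalizing a with
  | nil => simp
  | cons c t ih =>
    rw [List.foldl_cons, pvInner_eq, ← pvFactor_eq, ih, List.map_cons, List.prod_cons]
    ring

-- stage 1 builds exactly Counter(mask); its lookup is List.count
theorem pvCounts_getD (mask_find : String) (c : Char) :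
    (pvCounts mask_find).getD c 0 = (mask_find.toList.count c : Int) := by
  rw [pvCounts, PySem.Dict.foldl_insert_getD_add_one_eq_counter, PySem.Dict.getD_counter]

-- B's value, as a function of the character list
def pvB (l : List Char) : Int :=
  pvGenTable.foldl (fun space kv => space * kv.2 ^ (l.count kv.1)) 1

theorem pvB_cons (c : Char) (l : List Char) :
    pvB (c :: l) = pvFactor c * pvB l := by
  rw [pvB, pvB, pvFactor_eq, pvFoldl_mul, pvFoldl_mul, one_mul, one_mul]
  have hmap : (pvGenTable.map (fun kv => kv.2 ^ ((c :: l).count kv.1)))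
      = pvGenTable.map (fun kv =>
          (if c = kv.1 then kv.2 else 1) * kv.2 ^ (l.count kv.1)) := by
    apply List.map_congr_left
    intro kv _
    rw [List.count_cons]
    by_cases h : c = kv.1
    · simp [h, pow_add, mul_comm]
    · simp [h, beq_iff_eq]
  rw [hmap, List.prod_map_mul]

theorem pvB_eq (l : List Char) : pvB l = (l.map pvFactor).prod := by
  induction l with
  | nil => decide
  | cons c t ih => rw [pvB_cons, ih, List.map_cons, List.prod_cons]

-- the staged port equals pvB of the character list
theorem pvAlt_eq (mask_find : String) :
    calculate_generated_space_alt mask_find = pvB mask_find.toList := by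
  rw [calculate_generated_space_alt, pvB]
  apply PySem.List.foldl_congr_mem
  intro space kv _
  rw [pvCounts_getD]
  simp

-- ===== VERDICT (by name: the statement is the Claim_ definition above) =====
theorem calculate_generated_space_spec : Claim_equal_calculate_generated_space := by
  intro mask_find _
  show calculate_generated_space mask_find = calculate_generated_space_alt mask_find
  rw [calculate_generated_space, pvA_eq, one_mul, pvAlt_eq, pvB_eq]
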